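-- pv_equiv track=rewrite | github.com/silentdill1/hemodig | enzymes3.py | add_motif_tuples
-- ===== SOURCE A (Python) =====
-- def add_motif_tuples(motif_tuple1, motif_tuple2):
--     list_sum_of_tuples = []
--     doubles = []
--     for motif_index1 in range(0, len(motif_tuple1)):
--         for motif_index2 in range(0, len(motif_tuple2)):
--             motif1 = motif_tuple1[motif_index1]
--             motif2 = motif_tuple2[motif_index2]
--             if motif1[0] == motif2[0]:
--                 doubles.append([motif_index1, motif_index2])
--     for i in range(0, len(motif_tuple1)):
--         no_double = True
--         for pair in doubles:
--             if i == pair[0]: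
--                 no_double = False
--         if no_double:
--             list_sum_of_tuples.append(motif_tuple1[i])
--
--     for i in range(0, len(motif_tuple2)):
--             no_double = True
--             for pair in doubles:
--                 if i == pair[1]:
--                     no_double = False
--             if no_double:
--                     list_sum_of_tuples.append(motif_tuple2[i])
--     for pair in doubles:
--         list_sum_of_tuples.append((motif_tuple1[pair[0]][0], max(motif_tuple1[pair[0]][1], motif_tuple2[pair[1]][1])))
--
--     return tuple(list_sum_of_tuples)
-- ===== SOURCE B (Python) =====
-- def add_motif_tuples(motif_tuple1, motif_tuple2):
--     # Group tuple2's values by key once, so no nested index scans are needed.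
--     vals2 = {}
--     for key, val in motif_tuple2:
--         vals2.setdefault(key, []).append(val)
--     keys1 = set(key for key, _ in motif_tuple1)
--     out = [item for item in motif_tuple1 if item[0] not in vals2]
--     out += [item for item in motif_tuple2 if item[0] not in keys1]
--     for key, val in motif_tuple1:
--         if key in vals2:
--             for val2 in vals2[key]:
--                 out.append((key, max(val, val2)))
--     return tuple(out)
-- ===== Notes on version B (the rewrite author's own statement) =====
-- stated objective: faster
-- what changed: Replaced the quadratic index-pair scan (all (i,j) key matches collected into 'doubles', then rescanned for every index) by a one-pass dict grouping tuple2's values by key plus a key set for tuple1, so membership tests and the merge are direct lookups.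
import Mathlib
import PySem

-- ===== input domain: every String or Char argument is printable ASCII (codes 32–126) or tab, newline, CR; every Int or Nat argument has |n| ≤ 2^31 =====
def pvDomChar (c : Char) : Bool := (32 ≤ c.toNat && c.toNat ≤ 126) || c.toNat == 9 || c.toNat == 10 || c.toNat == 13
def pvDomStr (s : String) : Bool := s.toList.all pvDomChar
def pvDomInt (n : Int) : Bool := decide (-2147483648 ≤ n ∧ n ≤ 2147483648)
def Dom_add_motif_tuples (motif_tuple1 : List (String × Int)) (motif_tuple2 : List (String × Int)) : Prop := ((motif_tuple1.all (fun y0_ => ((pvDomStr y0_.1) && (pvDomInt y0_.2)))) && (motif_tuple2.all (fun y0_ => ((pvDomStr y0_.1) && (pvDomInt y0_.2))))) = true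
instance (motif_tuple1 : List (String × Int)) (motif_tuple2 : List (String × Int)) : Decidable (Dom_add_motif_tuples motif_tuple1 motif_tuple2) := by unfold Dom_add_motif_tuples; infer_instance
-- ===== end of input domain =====

-- B replaces A's quadratic index-pair scan by a one-pass dict grouping tuple2's values by key
-- (plus a key set for tuple1); same return value, the proof shows both equal a common closed form.

-- ===== PORT A =====
-- Transliteration of A: all list indices come from range(0, len(..)), so pyGetD's default is never used.
def add_motif_tuples (motif_tuple1 : List (String × Int)) (motif_tuple2 : List (String × Int)) : List (String × Int) :=
  let dflt : String × Int := ("", 0)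
  let doubles : List (Int × Int) :=
    (PySem.List.pyRange 0 (PySem.List.len motif_tuple1) 1).foldl (fun ds motif_index1 =>
      (PySem.List.pyRange 0 (PySem.List.len motif_tuple2) 1).foldl (fun ds motif_index2 =>
        if (PySem.List.pyGetD motif_tuple1 motif_index1 dflt).1 == (PySem.List.pyGetD motif_tuple2 motif_index2 dflt).1
        then ds ++ [(motif_index1, motif_index2)] else ds) ds) []
  let l1 : List (String × Int) :=
    (PySem.List.pyRange 0 (PySem.List.len motif_tuple1) 1).foldl (fun acc i =>
      let no_double := doubles.foldl (fun b pair => if i == pair.1 then false else b) true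
      if no_double then acc ++ [PySem.List.pyGetD motif_tuple1 i dflt] else acc) []
  let l2 : List (String × Int) :=
    (PySem.List.pyRange 0 (PySem.List.len motif_tuple2) 1).foldl (fun acc i =>
      let no_double := doubles.foldl (fun b pair => if i == pair.2 then false else b) true
      if no_double then acc ++ [PySem.List.pyGetD motif_tuple2 i dflt] else acc) l1
  doubles.foldl (fun acc pair =>
    acc ++ [((PySem.List.pyGetD motif_tuple1 pair.1 dflt).1,
             max (PySem.List.pyGetD motif_tuple1 pair.1 dflt).2 (PySem.List.pyGetD motif_tuple2 pair.2 dflt).2)]) l2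

-- ===== PORT B =====
def add_motif_tuples_alt (motif_tuple1 : List (String × Int)) (motif_tuple2 : List (String × Int)) : List (String × Int) :=
  let vals2 : PySem.Dict String (List Int) :=
    motif_tuple2.foldl (fun d p => d.modify p.1 [] (fun l => l ++ [p.2])) PySem.Dict.empty
  let keys1 : PySem.Set String := PySem.Set.ofList (motif_tuple1.map (fun p => p.1))
  let out1 := motif_tuple1.filter (fun item => !(vals2.contains item.1))
  let out2 := motif_tuple2.filter (fun item => !(PySem.Set.contains keys1 item.1))
  let merged := motif_tuple1.foldl (fun acc p =>
    if vals2.contains p.1 then acc ++ (vals2.getD p.1 []).map (fun v2 => (p.1, max p.2 v2)) else acc) []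
  out1 ++ out2 ++ merged

-- ===== PRECONDITION & SPEC =====
def Spec_add_motif_tuples (motif_tuple1 : List (String × Int)) (motif_tuple2 : List (String × Int)) (out : List (String × Int)) : Prop := out = add_motif_tuples_alt motif_tuple1 motif_tuple2
instance (motif_tuple1 : List (String × Int)) (motif_tuple2 : List (String × Int)) (out : List (String × Int)) : Decidable (Spec_add_motif_tuples motif_tuple1 motif_tuple2 out) := by unfold Spec_add_motif_tuples; infer_instance

-- ===== CLAIM (what is proved, stated in full; the proofs are below) =====
def Claim_equal_add_motif_tuples : Prop := ∀ (motif_tuple1 : List (String × Int)) (motif_tuple2 : List (String × Int)), Dom_add_motif_tuples motif_tuple1 motif_tuple2 → Spec_add_motif_tuples motif_tuple1 motif_tuple2 (add_motif_tuples motif_tuple1 motif_tuple2)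

-- ===== LEMMAS AND PROOFS =====

-- The common closed form both ports are shown to equal.
def pvCommon (t1 t2 : List (String × Int)) : List (String × Int) :=
  t1.filter (fun r => !decide (r.1 ∈ t2.map Prod.fst))
  ++ t2.filter (fun r => !decide (r.1 ∈ t1.map Prod.fst))
  ++ t1.flatMap (fun r => (t2.filter (fun q => r.1 == q.1)).map (fun q => (r.1, max r.2 q.2)))

-- A's "doubles" list, written over enumerations.
def pvDbl (t1 t2 : List (String × Int)) : List (Int × Int) :=
  (PySem.List.enumerate t1).flatMap (fun p =>
    ((PySem.List.enumerate t2).filter (fun q => p.2.1 == q.2.1)).map (fun q => (p.1, q.1)))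

theorem pv_getD_of_mem_enum {α : Type} (xs : List α) (d : α) (p : Int × α)
    (hp : p ∈ PySem.List.enumerate xs) : PySem.List.pyGetD xs p.1 d = p.2 := by
  rw [PySem.List.mem_enumerate_iff] at hp
  obtain ⟨k, hk, rfl⟩ := hp
  simp only [Int.zero_add]
  rw [PySem.List.pyGetD_eq_getElem xs d (by positivity) (by exact_mod_cast hk)]
  simp

theorem pv_enum_fst_inj {α : Type} (xs : List α) (s : Int) (p p' : Int × α)
    (hp : p ∈ PySem.List.enumerate xs s) (hp' : p' ∈ PySem.List.enumerate xs s)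
    (h : p.1 = p'.1) : p = p' := by
  rw [PySem.List.mem_enumerate_iff] at hp hp'
  obtain ⟨k, hk, rfl⟩ := hp
  obtain ⟨k', hk', rfl⟩ := hp'
  have : k = k' := by omega
  subst this; rfl

theorem pv_filter_map_snd_enum {α : Type} (xs : List α) (s : Int) (pr : α → Bool) :
    ((PySem.List.enumerate xs s).filter (fun q => pr q.2)).map (fun q => q.2) = xs.filter pr := by
  induction xs generalizing s with
  | nil => simp [PySem.List.enumerate_nil]
  | cons x xs ih =>
    rw [PySem.List.enumerate_cons]
    by_cases h : pr x <;> simp [h, ih]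

theorem pv_flatMap_snd_enum {α β : Type} (xs : List α) (s : Int) (h : α → List β) :
    (PySem.List.enumerate xs s).flatMap (fun p => h p.2) = xs.flatMap h := by
  induction xs generalizing s with
  | nil => simp [PySem.List.enumerate_nil]
  | cons x xs ih => rw [PySem.List.enumerate_cons]; simp [ih]

-- the no_double flag fold computes "no pair has this index as its pr-component"
theorem pv_flag_foldl (l : List (Int × Int)) (pr : Int × Int → Int) (i : Int) (b : Bool) :
    l.foldl (fun b pair => if i == pr pair then false else b) b
      = (b && l.all (fun pair => !(i == pr pair))) := by
  induction l generalizing b with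
  | nil => simp
  | cons x xs ih =>
    rw [List.foldl_cons, ih, List.all_cons]
    by_cases h : i == pr x <;> simp [h]

-- membership through the first component of doubles
theorem pv_dbl_fst (t1 t2 : List (String × Int)) (p : Int × (String × Int))
    (hp : p ∈ PySem.List.enumerate t1) :
    (∃ pr ∈ pvDbl t1 t2, pr.1 = p.1) ↔ p.2.1 ∈ t2.map Prod.fst := by
  constructor
  · rintro ⟨pr, hpr, hfst⟩
    simp only [pvDbl, List.mem_flatMap, List.mem_map, List.mem_filter] at hpr
    obtain ⟨p', hp', q, ⟨hq, hkey⟩, rfl⟩ := hpr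
    have : p' = p := pv_enum_fst_inj t1 0 p' p hp' hp hfst
    subst this
    refine List.mem_map.mpr ⟨q.2, ?_, by have := (beq_iff_eq).mp hkey; simp [this]⟩
    have := PySem.List.map_snd_enumerate t2 0
    exact this ▸ List.mem_map_of_mem hq
  · intro hmem
    obtain ⟨r, hr, hkey⟩ := List.mem_map.mp hmem
    obtain ⟨q, hq, hq2⟩ := List.mem_map.mp ((PySem.List.map_snd_enumerate t2 0) ▸ hr)
    refine ⟨(p.1, q.1), ?_, rfl⟩
    simp only [pvDbl, List.mem_flatMap, List.mem_map, List.mem_filter]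
    exact ⟨p, hp, q, ⟨hq, by simp [hq2, hkey]⟩, rfl⟩

-- membership through the second component of doubles
theorem pv_dbl_snd (t1 t2 : List (String × Int)) (q : Int × (String × Int))
    (hq : q ∈ PySem.List.enumerate t2) :
    (∃ pr ∈ pvDbl t1 t2, pr.2 = q.1) ↔ q.2.1 ∈ t1.map Prod.fst := by
  constructor
  · rintro ⟨pr, hpr, hsnd⟩
    simp only [pvDbl, List.mem_flatMap, List.mem_map, List.mem_filter] at hpr
    obtain ⟨p', hp', q', ⟨hq', hkey⟩, rfl⟩ := hpr
    have : q' = q := pv_enum_fst_inj t2 0 q' q hq' hq hsnd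
    subst this
    refine List.mem_map.mpr ⟨p'.2, ?_, by simpa using hkey⟩
    have := PySem.List.map_snd_enumerate t1 0
    exact this ▸ List.mem_map_of_mem hp'
  · intro hmem
    obtain ⟨r, hr, hkey⟩ := List.mem_map.mp hmem
    obtain ⟨p, hp, hp2⟩ := List.mem_map.mp ((PySem.List.map_snd_enumerate t1 0) ▸ hr)
    refine ⟨(p.1, q.1), ?_, rfl⟩
    simp only [pvDbl, List.mem_flatMap, List.mem_map, List.mem_filter]
    exact ⟨p, hp, q, ⟨hq, by simp [hp2, hkey]⟩, rfl⟩

theorem pv_filter_map_snd_enum' {α β : Type} (xs : List α) (s : Int) (pr : α → Bool) (f : α → β) :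
    ((PySem.List.enumerate xs s).filter (fun q => pr q.2)).map (fun q => f q.2) = (xs.filter pr).map f := by
  calc ((PySem.List.enumerate xs s).filter (fun q => pr q.2)).map (fun q => f q.2)
      = (((PySem.List.enumerate xs s).filter (fun q => pr q.2)).map (fun q => q.2)).map f := by
        rw [List.map_map]; rfl
    _ = (xs.filter pr).map f := by rw [pv_filter_map_snd_enum]

theorem pv_portA_eq_common (t1 t2 : List (String × Int)) :
    add_motif_tuples t1 t2 = pvCommon t1 t2 := by
  -- inner doubles loop over t2, for a fixed index i into t1
  have h2 : ∀ (i : Int) (ds : List (Int × Int)),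
      (PySem.List.pyRange 0 (PySem.List.len t2) 1).foldl (fun ds j =>
        if (PySem.List.pyGetD t1 i ("", 0)).1 == (PySem.List.pyGetD t2 j ("", 0)).1
        then ds ++ [(i, j)] else ds) ds
      = ds ++ ((PySem.List.enumerate t2).filter
          (fun q => (PySem.List.pyGetD t1 i ("", 0)).1 == q.2.1)).map (fun q => ((i, q.1) : Int × Int)) := by
    intro i ds
    have e : (PySem.List.pyRange 0 (PySem.List.len t2) 1).foldl (fun ds j =>
        if (PySem.List.pyGetD t1 i ("", 0)).1 == (PySem.List.pyGetD t2 j ("", 0)).1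
        then ds ++ [(i, j)] else ds) ds
        = (PySem.List.enumerate t2).foldl (fun ds q =>
            if (PySem.List.pyGetD t1 i ("", 0)).1 == q.2.1 then ds ++ [(i, q.1)] else ds) ds := by
      rw [PySem.List.enumerate_eq_map_pyRange t2 ("", 0), List.foldl_map]
    rw [e]
    exact PySem.List.foldl_append_if _ _ _ _
  -- the whole doubles computation
  have hdbl : (PySem.List.pyRange 0 (PySem.List.len t1) 1).foldl (fun ds i =>
      (PySem.List.pyRange 0 (PySem.List.len t2) 1).foldl (fun ds j =>
        if (PySem.List.pyGetD t1 i ("", 0)).1 == (PySem.List.pyGetD t2 j ("", 0)).1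
        then ds ++ [(i, j)] else ds) ds) []
      = pvDbl t1 t2 := by
    have e1 : (PySem.List.pyRange 0 (PySem.List.len t1) 1).foldl (fun ds i =>
        (PySem.List.pyRange 0 (PySem.List.len t2) 1).foldl (fun ds j =>
          if (PySem.List.pyGetD t1 i ("", 0)).1 == (PySem.List.pyGetD t2 j ("", 0)).1
          then ds ++ [(i, j)] else ds) ds) []
        = (PySem.List.pyRange 0 (PySem.List.len t1) 1).foldl (fun ds i =>
            ds ++ ((PySem.List.enumerate t2).filter
              (fun q => (PySem.List.pyGetD t1 i ("", 0)).1 == q.2.1)).map (fun q => ((i, q.1) : Int × Int))) [] := by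
      exact congrFun (congrFun (congrArg List.foldl (funext fun ds => funext fun i => h2 i ds)) []) _
    rw [e1]
    have e2 : (PySem.List.pyRange 0 (PySem.List.len t1) 1).foldl (fun ds i =>
        ds ++ ((PySem.List.enumerate t2).filter
          (fun q => (PySem.List.pyGetD t1 i ("", 0)).1 == q.2.1)).map (fun q => ((i, q.1) : Int × Int))) []
        = (PySem.List.enumerate t1).foldl (fun ds p =>
            ds ++ ((PySem.List.enumerate t2).filter (fun q => p.2.1 == q.2.1)).map (fun q => ((p.1, q.1) : Int × Int))) [] := by
      rw [PySem.List.enumerate_eq_map_pyRange t1 ("", 0), List.foldl_map]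
    rw [e2]
    exact PySem.List.foldl_append_eq_flatMap _ _ _
  -- the first filtering loop (unmatched elements of t1)
  have hl1 : (PySem.List.pyRange 0 (PySem.List.len t1) 1).foldl (fun acc i =>
      if (pvDbl t1 t2).foldl (fun b pair => if i == pair.1 then false else b) true
      then acc ++ [PySem.List.pyGetD t1 i ("", 0)] else acc) []
      = t1.filter (fun r => !decide (r.1 ∈ t2.map Prod.fst)) := by
    have e : (PySem.List.pyRange 0 (PySem.List.len t1) 1).foldl (fun acc i =>
        if (pvDbl t1 t2).foldl (fun b pair => if i == pair.1 then false else b) true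
        then acc ++ [PySem.List.pyGetD t1 i ("", 0)] else acc) []
        = (PySem.List.enumerate t1).foldl (fun acc p =>
            if (pvDbl t1 t2).foldl (fun b pair => if p.1 == pair.1 then false else b) true
            then acc ++ [p.2] else acc) [] := by
      rw [PySem.List.enumerate_eq_map_pyRange t1 ("", 0), List.foldl_map]
    rw [e]
    have hcong : ∀ (acc : List (String × Int)), ∀ p ∈ PySem.List.enumerate t1,
        (if (pvDbl t1 t2).foldl (fun b pair => if p.1 == pair.1 then false else b) true
         then acc ++ [p.2] else acc)
        = (if !decide (p.2.1 ∈ t2.map Prod.fst) then acc ++ [p.2] else acc) := by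
      intro acc p hp
      rw [pv_flag_foldl (pvDbl t1 t2) Prod.fst p.1 true, Bool.true_and]
      have hb : (pvDbl t1 t2).all (fun pair => !(p.1 == pair.1))
          = !decide (p.2.1 ∈ t2.map Prod.fst) := by
        by_cases hm : p.2.1 ∈ t2.map Prod.fst
        · obtain ⟨pr, hpr, hfst⟩ := (pv_dbl_fst t1 t2 p hp).mpr hm
          simp only [hm, decide_true, Bool.not_true]
          rw [List.all_eq_false]
          exact ⟨pr, hpr, by simp [hfst]⟩
        · have hno : ∀ pr ∈ pvDbl t1 t2, pr.1 ≠ p.1 :=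
            fun pr h heq => hm ((pv_dbl_fst t1 t2 p hp).mp ⟨pr, h, heq⟩)
          simp only [hm, decide_false, Bool.not_false]
          rw [List.all_eq_true]
          intro pair hpair
          simpa using fun h => (hno pair hpair) (by simpa using h.symm)
      rw [hb]
    rw [PySem.List.foldl_congr_mem _ _ _ _ hcong, PySem.List.foldl_append_if, List.nil_append]
    exact pv_filter_map_snd_enum t1 0 (fun r => !decide (r.1 ∈ t2.map Prod.fst))
  -- the second filtering loop (unmatched elements of t2), starting from any accumulator
  have hl2 : ∀ init : List (String × Int),
      (PySem.List.pyRange 0 (PySem.List.len t2) 1).foldl (fun acc i =>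
        if (pvDbl t1 t2).foldl (fun b pair => if i == pair.2 then false else b) true
        then acc ++ [PySem.List.pyGetD t2 i ("", 0)] else acc) init
      = init ++ t2.filter (fun r => !decide (r.1 ∈ t1.map Prod.fst)) := by
    intro init
    have e : (PySem.List.pyRange 0 (PySem.List.len t2) 1).foldl (fun acc i =>
        if (pvDbl t1 t2).foldl (fun b pair => if i == pair.2 then false else b) true
        then acc ++ [PySem.List.pyGetD t2 i ("", 0)] else acc) init
        = (PySem.List.enumerate t2).foldl (fun acc q =>
            if (pvDbl t1 t2).foldl (fun b pair => if q.1 == pair.2 then false else b) true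
            then acc ++ [q.2] else acc) init := by
      rw [PySem.List.enumerate_eq_map_pyRange t2 ("", 0), List.foldl_map]
    rw [e]
    have hcong : ∀ (acc : List (String × Int)), ∀ q ∈ PySem.List.enumerate t2,
        (if (pvDbl t1 t2).foldl (fun b pair => if q.1 == pair.2 then false else b) true
         then acc ++ [q.2] else acc)
        = (if !decide (q.2.1 ∈ t1.map Prod.fst) then acc ++ [q.2] else acc) := by
      intro acc q hq
      rw [pv_flag_foldl (pvDbl t1 t2) Prod.snd q.1 true, Bool.true_and]
      have hb : (pvDbl t1 t2).all (fun pair => !(q.1 == pair.2))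
          = !decide (q.2.1 ∈ t1.map Prod.fst) := by
        by_cases hm : q.2.1 ∈ t1.map Prod.fst
        · obtain ⟨pr, hpr, hsnd⟩ := (pv_dbl_snd t1 t2 q hq).mpr hm
          simp only [hm, decide_true, Bool.not_true]
          rw [List.all_eq_false]
          exact ⟨pr, hpr, by simp [hsnd]⟩
        · have hno : ∀ pr ∈ pvDbl t1 t2, pr.2 ≠ q.1 :=
            fun pr h heq => hm ((pv_dbl_snd t1 t2 q hq).mp ⟨pr, h, heq⟩)
          simp only [hm, decide_false, Bool.not_false]
          rw [List.all_eq_true]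
          intro pair hpair
          simpa using fun h => (hno pair hpair) (by simpa using h.symm)
      rw [hb]
    rw [PySem.List.foldl_congr_mem _ _ _ _ hcong, PySem.List.foldl_append_if]
    rw [pv_filter_map_snd_enum t2 0 (fun r => !decide (r.1 ∈ t1.map Prod.fst))]
  -- the final merge loop over doubles
  have hm : ∀ init : List (String × Int),
      (pvDbl t1 t2).foldl (fun acc pair =>
        acc ++ [((PySem.List.pyGetD t1 pair.1 ("", 0)).1,
                 max (PySem.List.pyGetD t1 pair.1 ("", 0)).2 (PySem.List.pyGetD t2 pair.2 ("", 0)).2)]) init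
      = init ++ t1.flatMap (fun r => (t2.filter (fun q => r.1 == q.1)).map (fun q => (r.1, max r.2 q.2))) := by
    intro init
    rw [PySem.List.foldl_append_singleton_eq_map
      (fun pair => ((PySem.List.pyGetD t1 pair.1 ("", 0)).1,
        max (PySem.List.pyGetD t1 pair.1 ("", 0)).2 (PySem.List.pyGetD t2 pair.2 ("", 0)).2)) (pvDbl t1 t2) init]
    congr 1
    unfold pvDbl
    rw [List.map_flatMap]
    rw [List.flatMap_congr (g := fun p =>
        ((PySem.List.enumerate t2).filter (fun q => p.2.1 == q.2.1)).map
          (fun q => (p.2.1, max p.2.2 q.2.2))) ?_]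
    · rw [pv_flatMap_snd_enum t1 0
        (fun r => ((PySem.List.enumerate t2).filter (fun q => r.1 == q.2.1)).map (fun q => (r.1, max r.2 q.2.2)))]
      refine List.flatMap_congr ?_
      intro r _
      exact pv_filter_map_snd_enum' t2 0 (fun q => r.1 == q.1) (fun q => (r.1, max r.2 q.2))
    · intro p hp
      rw [List.map_map]
      refine List.map_congr_left ?_
      intro q hq
      have hq2 := (List.mem_filter.mp hq).1
      simp only [Function.comp]
      rw [pv_getD_of_mem_enum t1 ("", 0) p hp, pv_getD_of_mem_enum t2 ("", 0) q hq2]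
  -- assemble: the port is definitionally this expression with the lets substituted
  show List.foldl (fun acc pair =>
        acc ++ [((PySem.List.pyGetD t1 pair.1 ("", 0)).1,
                 max (PySem.List.pyGetD t1 pair.1 ("", 0)).2 (PySem.List.pyGetD t2 pair.2 ("", 0)).2)])
      ((PySem.List.pyRange 0 (PySem.List.len t2) 1).foldl (fun acc i =>
        if ((PySem.List.pyRange 0 (PySem.List.len t1) 1).foldl (fun ds i =>
            (PySem.List.pyRange 0 (PySem.List.len t2) 1).foldl (fun ds j =>
              if (PySem.List.pyGetD t1 i ("", 0)).1 == (PySem.List.pyGetD t2 j ("", 0)).1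
              then ds ++ [(i, j)] else ds) ds) []).foldl (fun b pair => if i == pair.2 then false else b) true
        then acc ++ [PySem.List.pyGetD t2 i ("", 0)] else acc)
        ((PySem.List.pyRange 0 (PySem.List.len t1) 1).foldl (fun acc i =>
          if ((PySem.List.pyRange 0 (PySem.List.len t1) 1).foldl (fun ds i =>
              (PySem.List.pyRange 0 (PySem.List.len t2) 1).foldl (fun ds j =>
                if (PySem.List.pyGetD t1 i ("", 0)).1 == (PySem.List.pyGetD t2 j ("", 0)).1
                then ds ++ [(i, j)] else ds) ds) []).foldl (fun b pair => if i == pair.1 then false else b) true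
          then acc ++ [PySem.List.pyGetD t1 i ("", 0)] else acc) []))
      ((PySem.List.pyRange 0 (PySem.List.len t1) 1).foldl (fun ds i =>
        (PySem.List.pyRange 0 (PySem.List.len t2) 1).foldl (fun ds j =>
          if (PySem.List.pyGetD t1 i ("", 0)).1 == (PySem.List.pyGetD t2 j ("", 0)).1
          then ds ++ [(i, j)] else ds) ds) [])
      = pvCommon t1 t2
  rw [hdbl, hl1, hl2, hm]
  unfold pvCommon
  rw [List.append_assoc]

theorem pv_contains_vals2 (t2 : List (String × Int)) (d : PySem.Dict String (List Int)) (k : String) :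
    (t2.foldl (fun d p => d.modify p.1 [] (fun l => l ++ [p.2])) d).contains k
      = (d.contains k || decide (k ∈ t2.map Prod.fst)) := by
  induction t2 generalizing d with
  | nil => simp
  | cons x xs ih =>
    rw [List.foldl_cons, ih, PySem.Dict.contains_modify]
    by_cases h : k = x.1
    · simp [h]
    · have hb : (k == x.1) = false := by simp [h]
      have hm : decide (k ∈ x.1 :: List.map Prod.fst xs) = decide (k ∈ List.map Prod.fst xs) := by
        simp [List.mem_cons, h]
      rw [hb, List.map_cons, hm, Bool.false_or]

theorem pv_portB_eq_common (t1 t2 : List (String × Int)) :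
    add_motif_tuples_alt t1 t2 = pvCommon t1 t2 := by
  show t1.filter (fun item => !((t2.foldl (fun d p => d.modify p.1 [] (fun l => l ++ [p.2])) PySem.Dict.empty).contains item.1))
      ++ t2.filter (fun item => !(PySem.Set.contains (PySem.Set.ofList (t1.map (fun p => p.1))) item.1))
      ++ t1.foldl (fun acc p =>
          if (t2.foldl (fun d p => d.modify p.1 [] (fun l => l ++ [p.2])) PySem.Dict.empty).contains p.1
          then acc ++ ((t2.foldl (fun d p => d.modify p.1 [] (fun l => l ++ [p.2])) PySem.Dict.empty).getD p.1 []).map (fun v2 => (p.1, max p.2 v2))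
          else acc) []
      = pvCommon t1 t2
  have hct : ∀ k : String,
      (t2.foldl (fun d p => d.modify p.1 [] (fun l => l ++ [p.2])) PySem.Dict.empty).contains k
        = decide (k ∈ t2.map Prod.fst) := by
    intro k; rw [pv_contains_vals2]; simp
  have h1 : t1.filter (fun item => !((t2.foldl (fun d p => d.modify p.1 [] (fun l => l ++ [p.2])) PySem.Dict.empty).contains item.1))
      = t1.filter (fun r => !decide (r.1 ∈ t2.map Prod.fst)) := by
    refine List.filter_congr ?_
    intro x _
    rw [hct x.1]
  have h2 : t2.filter (fun item => !(PySem.Set.contains (PySem.Set.ofList (t1.map (fun p => p.1))) item.1))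
      = t2.filter (fun r => !decide (r.1 ∈ t1.map Prod.fst)) := by
    refine List.filter_congr ?_
    intro x _
    have : PySem.Set.contains (PySem.Set.ofList (t1.map (fun p => p.1))) x.1
        = decide (x.1 ∈ t1.map Prod.fst) := by
      simp [PySem.Set.contains, PySem.Set.mem_ofList]
    rw [this]
  have hcong : ∀ (acc : List (String × Int)), ∀ p ∈ t1,
      (if (t2.foldl (fun d p => d.modify p.1 [] (fun l => l ++ [p.2])) PySem.Dict.empty).contains p.1
       then acc ++ ((t2.foldl (fun d p => d.modify p.1 [] (fun l => l ++ [p.2])) PySem.Dict.empty).getD p.1 []).map (fun v2 => (p.1, max p.2 v2))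
       else acc)
      = acc ++ (t2.filter (fun q => p.1 == q.1)).map (fun q => (p.1, max p.2 q.2)) := by
    intro acc p _
    by_cases hc : (t2.foldl (fun d p => d.modify p.1 [] (fun l => l ++ [p.2])) PySem.Dict.empty).contains p.1
    · rw [if_pos hc, PySem.Dict.getD_foldl_modify_append t2 PySem.Dict.empty p.1]
      rw [PySem.Dict.getD_empty, List.nil_append, List.map_map]
      rw [List.filter_congr (fun (q : String × Int) (_ : q ∈ t2) =>
        show (q.1 == p.1) = (p.1 == q.1) by simp [eq_comm])]
      rfl
    · rw [if_neg hc]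
      have hnm : p.1 ∉ t2.map Prod.fst := by
        intro hmem
        rw [hct p.1] at hc
        simp [hmem] at hc
      have : t2.filter (fun q => p.1 == q.1) = [] := by
        rw [List.filter_eq_nil_iff]
        intro q hq hbeq
        exact hnm (List.mem_map.mpr ⟨q, hq, (beq_iff_eq.mp hbeq).symm⟩)
      rw [this, List.map_nil, List.append_nil]
  have h3 : t1.foldl (fun acc p =>
      if (t2.foldl (fun d p => d.modify p.1 [] (fun l => l ++ [p.2])) PySem.Dict.empty).contains p.1
      then acc ++ ((t2.foldl (fun d p => d.modify p.1 [] (fun l => l ++ [p.2])) PySem.Dict.empty).getD p.1 []).map (fun v2 => (p.1, max p.2 v2))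
      else acc) []
      = t1.flatMap (fun r => (t2.filter (fun q => r.1 == q.1)).map (fun q => (r.1, max r.2 q.2))) := by
    rw [PySem.List.foldl_congr_mem _ _ _ _ hcong, PySem.List.foldl_append_eq_flatMap, List.nil_append]
  rw [h1, h2, h3]
  unfold pvCommon
  rw [List.append_assoc]

-- ===== VERDICT (by name: the statement is the Claim_ definition above) =====
theorem add_motif_tuples_spec : Claim_equal_add_motif_tuples := by
  intro t1 t2 _
  unfold Spec_add_motif_tuples
  rw [pv_portA_eq_common, pv_portB_eq_common]
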